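-- pv_equiv track=rewrite | github.com/bashrc-real/Codearchive | cpp/codeforces/wordHashing.py | CalculateHash
-- ===== SOURCE A (Python) =====
-- def CalculateHash(word):
--     value = 0
--
--
--     primeList =  [20771,20773,20789,20807,20809,20849,20857,20873,20879,20887,20899,20903,20921,20929,20939]
--     primeList2 = [21121,21139,21143,21149,21157,21163, 21169,21179,21187,21191,21193,21211,21221,21227,21247,212692]
--     primeList3 = [20261,20269,20287,20297,20323,20327,20333,20341,20347,20353, 19423,19427,19429,19433,19441,19447,19457,19463,19469,19471]
--     primeList.extend(primeList2)
--     primeList.extend(primeList3)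
--     for char in word.lower():
--         position = ord(char) - ord('a')
--         if position >=0 and position <= 25:
--            value = (value + primeList[position])%(10**9 + 7)
--     return value
-- ===== SOURCE B (Python) =====
-- def CalculateHash(word):
--     # Only the first 26 prime slots (letters 'a'..'z') are ever indexed,
--     # so B keeps just those; it counts distinct letters once and takes one final mod.
--     primes = [20771, 20773, 20789, 20807, 20809, 20849, 20857, 20873, 20879,
--               20887, 20899, 20903, 20921, 20929, 20939, 21121, 21139, 21143,
--               21149, 21157, 21163, 21169, 21179, 21187, 21191, 21193]
--     counts = {}
--     for ch in word.lower():
--         counts[ch] = counts.get(ch, 0) + 1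
--     total = 0
--     for ch, cnt in counts.items():
--         pos = ord(ch) - 97
--         if 0 <= pos < 26:
--             total += cnt * primes[pos]
--     return total % (10**9 + 7)
-- ===== Notes on version B (the rewrite author's own statement) =====
-- stated objective: alternative
-- what changed: B builds a character-count dictionary of the lowercased word and computes the weighted sum count*prime over the distinct letters with one final mod, instead of A's per-character prime addition with a mod at every step (and B drops the 25 prime-table entries A can never index).
import Mathlib
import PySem

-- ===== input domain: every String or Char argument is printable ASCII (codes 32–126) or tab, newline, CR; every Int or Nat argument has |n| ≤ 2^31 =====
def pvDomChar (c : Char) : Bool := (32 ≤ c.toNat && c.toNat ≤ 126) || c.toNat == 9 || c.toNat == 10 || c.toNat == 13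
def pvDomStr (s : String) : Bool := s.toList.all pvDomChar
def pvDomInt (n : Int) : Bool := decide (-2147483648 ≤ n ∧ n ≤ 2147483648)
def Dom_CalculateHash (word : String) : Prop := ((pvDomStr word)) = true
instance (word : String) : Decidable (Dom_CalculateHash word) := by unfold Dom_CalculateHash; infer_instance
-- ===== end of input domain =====

-- B replaces A's per-character prime addition (mod at every step) by a distinct-letter
-- weighted sum over a character counter with one final mod; same value, alternative algorithm.

-- ===== PORT A =====
def CalculateHash (word : String) : Int :=
  let primeList : List Int := [20771,20773,20789,20807,20809,20849,20857,20873,20879,20887,20899,20903,20921,20929,20939]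
  let primeList2 : List Int := [21121,21139,21143,21149,21157,21163,21169,21179,21187,21191,21193,21211,21221,21227,21247,212692]
  let primeList3 : List Int := [20261,20269,20287,20297,20323,20327,20333,20341,20347,20353,19423,19427,19429,19433,19441,19447,19457,19463,19469,19471]
  let primeList := primeList ++ primeList2 ++ primeList3   -- the two .extend calls
  (PySem.Str.lower word).toList.foldl (fun value char =>
    let position : Int := (char.toNat : Int) - ('a'.toNat : Int)
    if position ≥ 0 ∧ position ≤ 25 then
      -- guard makes the index in range, so the IndexError branch (none) is unreachable
      (value + (PySem.List.pyGet? primeList position).getD 0) % (10^9 + 7)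
    else value) 0

-- ===== PORT B =====
def pvPrimesB : List Int := [20771,20773,20789,20807,20809,20849,20857,20873,20879,20887,20899,20903,20921,20929,20939,21121,21139,21143,21149,21157,21163,21169,21179,21187,21191,21193]

def CalculateHash_alt (word : String) : Int :=
  let counts := (PySem.Str.lower word).toList.foldl
    (fun d ch => d.insert ch (d.getD ch 0 + 1)) PySem.Dict.empty
  let total := counts.items.foldl (fun total p =>
    let pos : Int := (p.1.toNat : Int) - 97
    if 0 ≤ pos ∧ pos < 26 then
      total + p.2 * (PySem.List.pyGet? pvPrimesB pos).getD 0
    else total) 0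
  total % (10^9 + 7)

-- ===== PRECONDITION & SPEC =====
def Spec_CalculateHash (word : String) (out : Int) : Prop := out = CalculateHash_alt word
instance (word : String) (out : Int) : Decidable (Spec_CalculateHash word out) := by unfold Spec_CalculateHash; infer_instance

-- ===== CLAIM (what is proved, stated in full; the proofs are below) =====
def Claim_equal_CalculateHash : Prop := ∀ (word : String), Dom_CalculateHash word → Spec_CalculateHash word (CalculateHash word)

-- ===== LEMMAS AND PROOFS =====

-- A's 51-entry concatenated prime list, as one literal.
def pvPlA : List Int := [20771,20773,20789,20807,20809,20849,20857,20873,20879,20887,20899,20903,20921,20929,20939,21121,21139,21143,21149,21157,21163,21169,21179,21187,21191,21193,21211,21221,21227,21247,212692,20261,20269,20287,20297,20323,20327,20333,20341,20347,20353,19423,19427,19429,19433,19441,19447,19457,19463,19469,19471]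

-- the per-character weights of the two ports agree and are nonnegative
lemma pvGet_agree (i : Int) (h0 : 0 ≤ i - 97) (h1 : i - 97 ≤ 25) :
    (PySem.List.pyGet? pvPlA (i - 97)).getD 0 = (PySem.List.pyGet? pvPrimesB (i - 97)).getD 0 := by
  have h97 : (97 : Int) ≤ i := by omega
  have h122 : i ≤ 122 := by omega
  interval_cases i <;> decide

-- A's mod-at-every-step loop computes 'sum of the weights, mod M'
lemma pvFoldl_mod (P : Char → Prop) [DecidablePred P] (g : Char → Int) :
    ∀ (l : List Char) (v : Int), 0 ≤ v → v < (10:Int)^9 + 7 →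
    l.foldl (fun value c => if P c then (value + g c) % ((10:Int)^9 + 7) else value) v
      = (v + (l.map (fun c => if P c then g c else 0)).sum) % ((10:Int)^9 + 7) := by
  intro l
  induction l with
  | nil =>
    intro v h0 h1
    simpa using (Int.emod_eq_of_lt h0 h1).symm
  | cons c t ih =>
    intro v h0 h1
    by_cases hc : P c
    · have hM : (0:Int) < (10:Int)^9 + 7 := by norm_num
      have e0 : 0 ≤ (v + g c) % ((10:Int)^9 + 7) := Int.emod_nonneg _ (by norm_num)
      have e1 : (v + g c) % ((10:Int)^9 + 7) < (10:Int)^9 + 7 := Int.emod_lt_of_pos _ hM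
      simp only [List.foldl_cons, List.map_cons, List.sum_cons, if_pos hc]
      rw [ih _ e0 e1, Int.emod_add_emod]
      ring_nf
    · simp only [List.foldl_cons, List.map_cons, List.sum_cons, if_neg hc]
      rw [ih v h0 h1]
      ring_nf

-- B's accumulation loop is a plain sum
lemma pvFoldl_add {α : Type} (P : α → Prop) [DecidablePred P] (h : α → Int) :
    ∀ (l : List α) (a : Int),
    l.foldl (fun t x => if P x then t + h x else t) a
      = a + (l.map (fun x => if P x then h x else 0)).sum := by
  intro l
  induction l with
  | nil => intro a; simp
  | cons x t ih =>
    intro a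
    by_cases hx : P x
    · simp [hx, ih]; ring
    · simp [hx, ih]

lemma pvSum_indicator (x : Char) (t : Char → Int) :
    ∀ (S : List Char), S.Nodup → x ∈ S →
    (S.map (fun k => (if x == k then (1:Int) else 0) * t k)).sum = t x := by
  intro S
  induction S with
  | nil => intro _ h; cases h
  | cons a T ih =>
    intro hnd hmem
    rcases List.mem_cons.mp hmem with rfl | hT
    · have hnot : x ∉ T := (List.nodup_cons.mp hnd).1
      have htail : (T.map (fun k => (if x == k then (1:Int) else 0) * t k)).sum = 0 := by
        apply List.sum_eq_zero
        intro y hy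
        rcases List.mem_map.mp hy with ⟨k, hk, rfl⟩
        have hne : (x == k) = false := beq_eq_false_iff_ne.mpr (fun h => hnot (h ▸ hk))
        rw [hne]; simp
      rw [List.map_cons, List.sum_cons, htail, add_zero, beq_self_eq_true]; simp
    · have hne : (x == a) = false :=
        beq_eq_false_iff_ne.mpr (fun h => (List.nodup_cons.mp hnd).1 (h ▸ hT))
      rw [List.map_cons, List.sum_cons, hne, ih (List.nodup_cons.mp hnd).2 hT]; simp

-- the key counting identity: summing count(k)·u(k) over the distinct elements
-- equals summing u over the whole list
lemma pvSum_count_dedup (u : Char → Int) :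
    ∀ (l : List Char),
    ((PySem.Set.ofList l).map (fun k => ((l.count k : Int)) * u k)).sum = (l.map u).sum := by
  intro l
  induction l using List.reverseRecOn with
  | nil => simp [PySem.Set.ofList]
  | append_singleton l x ih =>
    have hof : PySem.Set.ofList (l ++ [x]) = PySem.Set.add (PySem.Set.ofList l) x :=
      PySem.Set.ofList_append_singleton l x
    have hcount : ∀ k : Char, (((l ++ [x]).count k : Int))
        = (l.count k : Int) + (if x == k then 1 else 0) := by
      intro k
      rw [List.count_append]
      push_cast
      congr 1
      simp [List.count_singleton]
    by_cases hx : x ∈ l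
    · have hadd : PySem.Set.add (PySem.Set.ofList l) x = PySem.Set.ofList l :=
        PySem.Set.add_of_mem ((PySem.Set.mem_ofList l x).mpr hx)
      rw [hof, hadd]
      have hsplit : ((PySem.Set.ofList l).map (fun k => (((l ++ [x]).count k : Int)) * u k)).sum
          = ((PySem.Set.ofList l).map (fun k => ((l.count k : Int)) * u k)).sum
            + ((PySem.Set.ofList l).map (fun k => (if x == k then (1:Int) else 0) * u k)).sum := by
        rw [← List.sum_map_add]
        apply congrArg
        apply List.map_congr_left
        intro k _
        rw [hcount k]; ring
      rw [hsplit, ih,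
        pvSum_indicator x u _ (PySem.Set.nodup_ofList l) ((PySem.Set.mem_ofList l x).mpr hx)]
      simp
    · have hadd : PySem.Set.add (PySem.Set.ofList l) x = PySem.Set.ofList l ++ [x] :=
        PySem.Set.add_of_not_mem (fun h => hx ((PySem.Set.mem_ofList l x).mp h))
      rw [hof, hadd]
      rw [List.map_append, List.sum_append]
      have h1 : ((PySem.Set.ofList l).map (fun k => (((l ++ [x]).count k : Int)) * u k)).sum
          = ((PySem.Set.ofList l).map (fun k => ((l.count k : Int)) * u k)).sum := by
        apply congrArg
        apply List.map_congr_left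
        intro k hk
        have hkl : k ∈ l := (PySem.Set.mem_ofList l k).mp hk
        have : (x == k) = false := beq_eq_false_iff_ne.mpr (fun h => hx (h ▸ hkl))
        rw [hcount k, this]; simp
      have h2 : (((l ++ [x]).count x : Int)) = 1 := by
        rw [hcount x]
        simp [List.count_eq_zero_of_not_mem hx]
      simp only [List.map_cons, List.map_nil, List.sum_cons, List.sum_nil]
      rw [h1, ih, h2]
      simp

-- ===== VERDICT (by name: the statement is the Claim_ definition above) =====
theorem CalculateHash_spec : Claim_equal_CalculateHash := by
  intro word _
  unfold Spec_CalculateHash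
  have hA : CalculateHash word
      = (0 + ((PySem.Str.lower word).toList.map (fun c =>
          if ((c.toNat : Int) - 97) ≥ 0 ∧ ((c.toNat : Int) - 97) ≤ 25 then
            (PySem.List.pyGet? pvPlA ((c.toNat : Int) - 97)).getD 0
          else 0)).sum) % ((10:Int)^9 + 7) :=
    pvFoldl_mod _ _ _ 0 le_rfl (by norm_num)
  have hB : CalculateHash_alt word
      = (0 + ((PySem.Set.ofList (PySem.Str.lower word).toList).map (fun k =>
          if 0 ≤ ((k.toNat : Int) - 97) ∧ ((k.toNat : Int) - 97) < 26 then
            (((PySem.Str.lower word).toList.count k : Int))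
              * (PySem.List.pyGet? pvPrimesB ((k.toNat : Int) - 97)).getD 0
          else 0)).sum) % ((10:Int)^9 + 7) := by
    show (((PySem.Dict.counter (PySem.Str.lower word).toList).items.foldl (fun total p =>
        if 0 ≤ ((p.1.toNat : Int) - 97) ∧ ((p.1.toNat : Int) - 97) < 26 then
          total + p.2 * (PySem.List.pyGet? pvPrimesB ((p.1.toNat : Int) - 97)).getD 0
        else total) 0) % ((10:Int)^9 + 7)) = _
    rw [PySem.Dict.items_counter]
    simp only [List.foldl_map]
    rw [pvFoldl_add]
  rw [hA, hB]
  have hsum : ((PySem.Str.lower word).toList.map (fun c =>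
          if ((c.toNat : Int) - 97) ≥ 0 ∧ ((c.toNat : Int) - 97) ≤ 25 then
            (PySem.List.pyGet? pvPlA ((c.toNat : Int) - 97)).getD 0
          else 0)).sum
      = ((PySem.Set.ofList (PySem.Str.lower word).toList).map (fun k =>
          if 0 ≤ ((k.toNat : Int) - 97) ∧ ((k.toNat : Int) - 97) < 26 then
            (((PySem.Str.lower word).toList.count k : Int))
              * (PySem.List.pyGet? pvPrimesB ((k.toNat : Int) - 97)).getD 0
          else 0)).sum := by
    have hmapeq : ((PySem.Set.ofList (PySem.Str.lower word).toList).map (fun k =>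
          if 0 ≤ ((k.toNat : Int) - 97) ∧ ((k.toNat : Int) - 97) < 26 then
            (((PySem.Str.lower word).toList.count k : Int))
              * (PySem.List.pyGet? pvPrimesB ((k.toNat : Int) - 97)).getD 0
          else 0)).sum
        = ((PySem.Set.ofList (PySem.Str.lower word).toList).map (fun k =>
            (((PySem.Str.lower word).toList.count k : Int))
              * (if 0 ≤ ((k.toNat : Int) - 97) ∧ ((k.toNat : Int) - 97) < 26 then
                  (PySem.List.pyGet? pvPrimesB ((k.toNat : Int) - 97)).getD 0 else 0))).sum := by
      apply congrArg
      apply List.map_congr_left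
      intro k _
      by_cases hq : 0 ≤ ((k.toNat : Int) - 97) ∧ ((k.toNat : Int) - 97) < 26 <;>
        simp [hq]
    rw [hmapeq, pvSum_count_dedup]
    apply congrArg
    apply List.map_congr_left
    intro c _
    by_cases hq : 0 ≤ ((c.toNat : Int) - 97) ∧ ((c.toNat : Int) - 97) < 26
    · have hq' : ((c.toNat : Int) - 97) ≥ 0 ∧ ((c.toNat : Int) - 97) ≤ 25 := by omega
      rw [if_pos hq', if_pos hq]
      exact pvGet_agree _ hq'.1 hq'.2
    · have hq' : ¬ (((c.toNat : Int) - 97) ≥ 0 ∧ ((c.toNat : Int) - 97) ≤ 25) := by omega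
      rw [if_neg hq', if_neg hq]
  rw [hsum]
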